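-- pv_equiv track=rewrite | github.com/Chevis-hah/Trader | validation/purged_cv.py | _compute_fold_bounds
-- ===== SOURCE A (Python) =====
-- def _compute_fold_bounds(n: int, k: int) -> list[tuple[int, int]]:
--     """
--     把 [0, n) 分成 k 个大致等长的连续块。余数分给最后若干块 (更均匀)。
--     """
--     base = n // k
--     rem = n - base * k
--     bounds = []
--     start = 0
--     for i in range(k):
--         sz = base + (1 if i < rem else 0)
--         bounds.append((start, start + sz))
--         start += sz
--     return bounds
-- ===== SOURCE B (Python) =====
-- def _compute_fold_bounds(n: int, k: int) -> list[tuple[int, int]]: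
--     """
--     把 [0, n) 分成 k 个大致等长的连续块。余数分给最后若干块 (更均匀)。
--     """
--     base, rem = divmod(n, k)
--     return [(i * base + min(i, rem), (i + 1) * base + min(i + 1, rem))
--             for i in range(k)]
-- ===== Notes on version B (the rewrite author's own statement) =====
-- stated objective: simpler
-- what changed: Replaces the running-start accumulator loop with a comprehension where each fold boundary is a closed-form function of its index (i*base + min(i, rem)).
import Mathlib
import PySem

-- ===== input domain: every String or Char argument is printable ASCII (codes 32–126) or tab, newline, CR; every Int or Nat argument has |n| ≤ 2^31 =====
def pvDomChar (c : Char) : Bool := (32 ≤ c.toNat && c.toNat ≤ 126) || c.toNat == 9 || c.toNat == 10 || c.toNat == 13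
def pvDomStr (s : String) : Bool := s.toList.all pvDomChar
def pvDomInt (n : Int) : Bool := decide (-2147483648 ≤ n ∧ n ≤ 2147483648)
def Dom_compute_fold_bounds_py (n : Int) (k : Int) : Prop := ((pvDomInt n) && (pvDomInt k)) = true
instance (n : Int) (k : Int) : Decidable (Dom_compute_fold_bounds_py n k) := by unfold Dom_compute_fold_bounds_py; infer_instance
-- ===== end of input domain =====

-- B replaces A's running-start accumulator by a closed-form boundary i*base + min(i, rem) per fold (simpler; same cost).

-- ===== PORT A =====
-- literal port of A: base = n // k; rem = n - base*k; loop over range(k) carrying (bounds, start)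
def compute_fold_bounds_py (n : Int) (k : Int) : List (Int × Int) :=
  let base := PySem.Int.floordiv n k
  let rem := n - base * k
  let st := (PySem.List.pyRange 0 k 1).foldl
    (fun (s : List (Int × Int) × Int) i =>
      let sz := base + (if i < rem then (1:Int) else 0)
      (s.1 ++ [(s.2, s.2 + sz)], s.2 + sz)) ([], 0)
  st.1

-- ===== PORT B =====
-- literal port of B: base, rem = divmod(n, k); comprehension with closed-form boundaries
def compute_fold_bounds_py_alt (n : Int) (k : Int) : List (Int × Int) :=
  match PySem.Int.divmod? n k with
  | none => []
  | some (base, rem) =>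
    (PySem.List.pyRange 0 k 1).map (fun i =>
      (i * base + min i rem, (i + 1) * base + min (i + 1) rem))

-- ===== PRECONDITION & SPEC =====
-- A raises ZeroDivisionError when k = 0; excluded.
def Pre_compute_fold_bounds_py (n : Int) (k : Int) : Prop := k ≠ 0
instance (n : Int) (k : Int) : Decidable (Pre_compute_fold_bounds_py n k) := by unfold Pre_compute_fold_bounds_py; infer_instance
def pvWitness_compute_fold_bounds_py : Int × Int := (10, 3)

def Spec_compute_fold_bounds_py (n : Int) (k : Int) (out : List (Int × Int)) : Prop := out = compute_fold_bounds_py_alt n k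
instance (n : Int) (k : Int) (out : List (Int × Int)) : Decidable (Spec_compute_fold_bounds_py n k out) := by unfold Spec_compute_fold_bounds_py; infer_instance

-- ===== CLAIM (what is proved, stated in full; the proofs are below) =====
def Claim_equal_compute_fold_bounds_py : Prop := ∀ (n : Int) (k : Int), Dom_compute_fold_bounds_py n k → Pre_compute_fold_bounds_py n k → Spec_compute_fold_bounds_py n k (compute_fold_bounds_py n k)

-- ===== LEMMAS AND PROOFS =====

-- the loop invariant: starting the fold at index j with start = j*base + min j rem
-- appends exactly the closed-form tuples for indices j..k-1
theorem fold_closed_form (base rem : Int) :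
    ∀ (m : Nat) (j k : Int), j ≤ k → (k - j).toNat = m →
    ∀ (acc : List (Int × Int)),
      (PySem.List.pyRange j k 1).foldl
        (fun (s : List (Int × Int) × Int) i =>
          let sz := base + (if i < rem then (1:Int) else 0)
          (s.1 ++ [(s.2, s.2 + sz)], s.2 + sz)) (acc, j * base + min j rem)
      = (acc ++ (PySem.List.pyRange j k 1).map (fun i =>
          (i * base + min i rem, (i + 1) * base + min (i + 1) rem)),
         k * base + min k rem) := by
  intro m
  induction m with
  | zero =>
    intro j k hjk' hm acc
    have hjk : j = k := by omega
    subst hjk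
    rw [PySem.List.pyRange_one_eq_nil le_rfl]
    simp
  | succ m ih =>
    intro j k hjk' hm acc
    have hjk : j < k := by omega
    rw [PySem.List.pyRange_one_cons hjk]
    simp only [List.foldl_cons, List.map_cons]
    have hstep : j * base + min j rem + (base + (if j < rem then (1:Int) else 0))
        = (j + 1) * base + min (j + 1) rem := by
      by_cases h : j < rem
      · have h1 : min j rem = j := by omega
        have h2 : min (j + 1) rem = j + 1 := by omega
        rw [if_pos h, h1, h2]; ring
      · have h1 : min j rem = rem := by omega
        have h2 : min (j + 1) rem = rem := by omega
        rw [if_neg h, h1, h2]; ring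
    have := ih (j + 1) k (by omega) (by omega) (acc ++ [(j * base + min j rem, j * base + min j rem + (base + (if j < rem then (1:Int) else 0)))])
    rw [hstep] at this ⊢
    rw [this]
    simp

-- ===== VERDICT (by name: the statement is the Claim_ definition above) =====
theorem compute_fold_bounds_py_spec : Claim_equal_compute_fold_bounds_py := by
  intro n k _ hk
  unfold Spec_compute_fold_bounds_py compute_fold_bounds_py compute_fold_bounds_py_alt
  simp only [PySem.Int.divmod?, if_neg hk]
  rcases lt_trichotomy k 0 with h | h | h
  · rw [PySem.List.pyRange_one_eq_nil (by omega)]; simp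
  · exact absurd h hk
  · have hrem : n - PySem.Int.floordiv n k * k = PySem.Int.mod n k := by
      have := PySem.Int.floordiv_mul_add_mod n k; omega
    have h0 : (0:Int) ≤ PySem.Int.mod n k := PySem.Int.mod_nonneg n h
    have hmin : (0:Int) * PySem.Int.floordiv n k + min 0 (n - PySem.Int.floordiv n k * k) = 0 := by
      rw [hrem]; simp [min_eq_left h0]
    have := fold_closed_form (PySem.Int.floordiv n k) (n - PySem.Int.floordiv n k * k)
      (k - 0).toNat 0 k (by omega) rfl []
    rw [hmin] at this
    rw [this]
    rw [hrem]
    simp [PySem.Int.floordiv, PySem.Int.mod]
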